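-- pv_equiv track=rewrite | github.com/BaeInpyo/ProgrammingExercise | Chapter7_DivideConquer/Fanmeeting/ygg_fanmeeting.py | solution
-- ===== SOURCE A (Python) =====
-- def solution(members, maleFans, totalCase):
--     result = 0
--     failCaseDict = {}
--     for memberIdx in range(len(members)):
--         member = members[memberIdx]
--         if member == 'F':
--             continue
--         else:
--             for maleFanIdx in maleFans:
--                 caseIdx = maleFanIdx - memberIdx
--                 if not(caseIdx < 0 or caseIdx >= totalCase):
--                     failCaseDict[caseIdx] = 1
--
--     result = totalCase - sum(failCaseDict.values())
--     return result
-- ===== SOURCE B (Python) =====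
-- def solution(members, maleFans, totalCase):
--     # Bitset algorithm: pack the male-member positions into one big integer
--     # (bit L-1-i set iff members[i] is male).  For each fan f, the colliding
--     # shifts f - i are exactly the bits of (rev << f) >> (L - 1); OR them all
--     # into one failure bitmask clipped to shifts < totalCase, then count its
--     # set bits with Kernighan's trick.  Word-parallel: no per-pair bookkeeping.
--     L = len(members)
--     rev = 0
--     for ch in members:
--         rev = (rev << 1) | (ch != 'F')
--     tcMask = (1 << totalCase) - 1 if totalCase > 0 else 0
--     fails = 0
--     if rev:
--         for f in maleFans:
--             if f >= 0:
--                 fails |= ((rev << f) >> (L - 1)) & tcMask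
--     cnt = 0
--     while fails:
--         fails &= fails - 1
--         cnt += 1
--     return totalCase - cnt
-- ===== Notes on version B (the rewrite author's own statement) =====
-- stated objective: faster
-- what changed: A marks each colliding shift in a per-pair hash-map and subtracts the sum of its values; B packs the male-member positions into one big-integer bitmask, ORs one shifted copy of it per fan into a failure bitmask (clipped below totalCase), and counts its set bits with Kernighan's trick - the per-pair inner loop and all per-shift bookkeeping disappear into word-parallel big-integer operations.
import Mathlib
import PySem

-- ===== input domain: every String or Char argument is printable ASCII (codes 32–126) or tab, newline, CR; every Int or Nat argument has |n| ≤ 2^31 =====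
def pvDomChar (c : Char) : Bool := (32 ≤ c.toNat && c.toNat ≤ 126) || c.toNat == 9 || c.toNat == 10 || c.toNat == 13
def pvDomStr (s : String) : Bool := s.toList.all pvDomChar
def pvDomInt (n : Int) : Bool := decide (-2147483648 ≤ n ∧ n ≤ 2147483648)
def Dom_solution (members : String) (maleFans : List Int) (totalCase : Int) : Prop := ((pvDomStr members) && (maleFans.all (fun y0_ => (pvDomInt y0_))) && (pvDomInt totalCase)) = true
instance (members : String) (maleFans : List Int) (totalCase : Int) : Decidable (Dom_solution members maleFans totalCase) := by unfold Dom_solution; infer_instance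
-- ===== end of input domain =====

-- B replaces A's per-pair hash-map marking with a big-integer bitmask convolution (one shifted OR per fan) plus a Kernighan bit count; measurably faster by word-parallelism.

-- ===== PORT A =====
-- A: mark every valid shift f - i (male member i, fan f) in a dict, answer = totalCase - sum of the dict's values.
def solution (members : String) (maleFans : List Int) (totalCase : Int) : Int :=
  let failCaseDict : PySem.Dict Int Int :=
    (PySem.List.pyRange 0 (PySem.Str.len members) 1).foldl (fun d memberIdx =>
      match PySem.Str.pyGet? members memberIdx with
      | none => d      -- unreachable: memberIdx ∈ range(len(members))
      | some member =>
        if member = 'F' then d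
        else
          maleFans.foldl (fun d maleFanIdx =>
            let caseIdx := maleFanIdx - memberIdx
            if ¬ (caseIdx < 0 ∨ caseIdx ≥ totalCase) then d.insert caseIdx 1 else d) d)
      PySem.Dict.empty
  totalCase - failCaseDict.values.sum

-- ===== PORT B =====
-- termination helper for the Kernighan loop (cited by its decreasing_by)
theorem kern_dec (fails : Int) (h : 0 < fails) :
    (PySem.Int.band fails (fails - 1)).toNat < fails.toNat := by
  rw [PySem.Int.band_of_nonneg (by omega) (by omega)]
  have h1 : fails.toNat &&& (fails - 1).toNat ≤ (fails - 1).toNat := Nat.and_le_right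
  omega

-- B's trailing 'while fails: fails &= fails - 1; cnt += 1' loop.  fails is always
-- ≥ 0 here, where '0 < fails' is exactly Python's 'while fails:'; it also serves as
-- the totality guard.
def kernighan (fails : Int) (cnt : Int) : Int :=
  if h : 0 < fails then kernighan (PySem.Int.band fails (fails - 1)) (cnt + 1) else cnt
termination_by fails.toNat
decreasing_by exact kern_dec fails h

-- B: bitmask of male members (bit L-1-i), one shifted OR per fan, Kernighan count.
def solution_alt (members : String) (maleFans : List Int) (totalCase : Int) : Int :=
  let L : Int := PySem.Str.len members
  let rev : Int := members.toList.foldl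
    (fun rev ch => PySem.Int.bor (rev <<< (1 : Nat)) (if ch ≠ 'F' then 1 else 0)) 0
  let tcMask : Int := if 0 < totalCase then ((1 : Int) <<< totalCase.toNat) - 1 else 0
  let fails : Int :=
    if rev ≠ 0 then
      maleFans.foldl (fun fails (f : Int) =>
        if 0 ≤ f then
          PySem.Int.bor fails (PySem.Int.band ((rev <<< f.toNat) >>> (L - 1).toNat) tcMask)
        else fails) 0
    else 0
  totalCase - kernighan fails 0

-- ===== PRECONDITION & SPEC =====
def Spec_solution (members : String) (maleFans : List Int) (totalCase : Int) (out : Int) : Prop := out = solution_alt members maleFans totalCase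
instance (members : String) (maleFans : List Int) (totalCase : Int) (out : Int) : Decidable (Spec_solution members maleFans totalCase out) := by unfold Spec_solution; infer_instance

-- ===== CLAIM =====
def Claim_equal_solution : Prop := ∀ (members : String) (maleFans : List Int) (totalCase : Int), Dom_solution members maleFans totalCase → Spec_solution members maleFans totalCase (solution members maleFans totalCase)

-- ===== LEMMAS AND PROOFS =====

-- invariant of A's dict: keys distinct and every stored value is 1
def dictP (d : PySem.Dict Int Int) : Prop := d.keys.Nodup ∧ ∀ v ∈ d.values, v = 1

theorem inner_fold_lemma (tc i : Int) (fans : List Int) (d : PySem.Dict Int Int) (h : dictP d) :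
    dictP (fans.foldl (fun d maleFanIdx =>
            let caseIdx := maleFanIdx - i
            if ¬ (caseIdx < 0 ∨ caseIdx ≥ tc) then d.insert caseIdx 1 else d) d)
    ∧ ∀ x, x ∈ (fans.foldl (fun d maleFanIdx =>
            let caseIdx := maleFanIdx - i
            if ¬ (caseIdx < 0 ∨ caseIdx ≥ tc) then d.insert caseIdx 1 else d) d).keys
          ↔ x ∈ d.keys ∨ ∃ f ∈ fans, x = f - i ∧ 0 ≤ x ∧ x < tc := by
  induction fans generalizing d with
  | nil => simpa using h
  | cons a t ih =>
    simp only [List.foldl_cons]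
    by_cases hc : ¬ (a - i < 0 ∨ a - i ≥ tc)
    · simp only [if_pos hc]
      have hd' : dictP (d.insert (a - i) 1) := by
        refine ⟨PySem.Dict.nodup_keys_insert d _ _ h.1, ?_⟩
        intro v hv
        rcases PySem.Dict.mem_values_insert d (a - i) 1 v hv with rfl | hv'
        · rfl
        · exact h.2 v hv'
      obtain ⟨hP, hK⟩ := ih (d.insert (a - i) 1) hd'
      refine ⟨hP, fun x => ?_⟩
      rw [hK x, PySem.Dict.mem_keys_insert d (a - i) x 1]
      constructor
      · rintro ((rfl | hx) | ⟨f, hf, rfl, hb⟩)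
        · exact Or.inr ⟨a, by simp, rfl, by omega⟩
        · exact Or.inl hx
        · exact Or.inr ⟨f, by simp [hf], rfl, hb⟩
      · rintro (hx | ⟨f, hf, rfl, hb⟩)
        · exact Or.inl (Or.inr hx)
        · rcases List.mem_cons.mp hf with rfl | hf
          · exact Or.inl (Or.inl rfl)
          · exact Or.inr ⟨f, hf, rfl, hb⟩
    · simp only [if_neg hc]
      obtain ⟨hP, hK⟩ := ih d h
      refine ⟨hP, fun x => ?_⟩
      rw [hK x]
      constructor
      · rintro (hx | ⟨f, hf, rfl, hb⟩)
        · exact Or.inl hx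
        · exact Or.inr ⟨f, by simp [hf], rfl, hb⟩
      · rintro (hx | ⟨f, hf, rfl, hb⟩)
        · exact Or.inl hx
        · rcases List.mem_cons.mp hf with rfl | hf
          · exact absurd (of_not_not hc) (by omega)
          · exact Or.inr ⟨f, hf, rfl, hb⟩

theorem outer_fold_lemma (members : String) (fans : List Int) (tc : Int)
    (idxs : List Int) (d : PySem.Dict Int Int) (h : dictP d) :
    dictP (idxs.foldl (fun d memberIdx =>
      match PySem.Str.pyGet? members memberIdx with
      | none => d
      | some member =>
        if member = 'F' then d
        else
          fans.foldl (fun d maleFanIdx =>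
            let caseIdx := maleFanIdx - memberIdx
            if ¬ (caseIdx < 0 ∨ caseIdx ≥ tc) then d.insert caseIdx 1 else d) d) d)
    ∧ ∀ x, x ∈ (idxs.foldl (fun d memberIdx =>
      match PySem.Str.pyGet? members memberIdx with
      | none => d
      | some member =>
        if member = 'F' then d
        else
          fans.foldl (fun d maleFanIdx =>
            let caseIdx := maleFanIdx - memberIdx
            if ¬ (caseIdx < 0 ∨ caseIdx ≥ tc) then d.insert caseIdx 1 else d) d) d).keys
        ↔ x ∈ d.keys ∨ ∃ i ∈ idxs, (∃ c, PySem.Str.pyGet? members i = some c ∧ c ≠ 'F')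
              ∧ ∃ f ∈ fans, x = f - i ∧ 0 ≤ x ∧ x < tc := by
  induction idxs generalizing d with
  | nil => simpa using h
  | cons a t ih =>
    simp only [List.foldl_cons]
    cases hm : PySem.Str.pyGet? members a with
    | none =>
      obtain ⟨hP, hK⟩ := ih d h
      refine ⟨hP, fun x => ?_⟩
      rw [hK x]
      constructor
      · rintro (hx | ⟨i, hi, hc, rest⟩)
        · exact Or.inl hx
        · exact Or.inr ⟨i, by simp [hi], hc, rest⟩
      · rintro (hx | ⟨i, hi, ⟨c, hcg, hcF⟩, rest⟩)
        · exact Or.inl hx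
        · rcases List.mem_cons.mp hi with rfl | hi
          · rw [hm] at hcg; cases hcg
          · exact Or.inr ⟨i, hi, ⟨c, hcg, hcF⟩, rest⟩
    | some c =>
      by_cases hF : c = 'F'
      · simp only [if_pos hF]
        obtain ⟨hP, hK⟩ := ih d h
        refine ⟨hP, fun x => ?_⟩
        rw [hK x]
        constructor
        · rintro (hx | ⟨i, hi, hc, rest⟩)
          · exact Or.inl hx
          · exact Or.inr ⟨i, by simp [hi], hc, rest⟩
        · rintro (hx | ⟨i, hi, ⟨c', hcg, hcF⟩, rest⟩)
          · exact Or.inl hx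
          · rcases List.mem_cons.mp hi with rfl | hi
            · rw [hm] at hcg; cases hcg; exact absurd hF hcF
            · exact Or.inr ⟨i, hi, ⟨c', hcg, hcF⟩, rest⟩
      · simp only [if_neg hF]
        obtain ⟨hPi, hKi⟩ := inner_fold_lemma tc a fans d h
        obtain ⟨hP, hK⟩ := ih _ hPi
        refine ⟨hP, fun x => ?_⟩
        rw [hK x, hKi x]
        constructor
        · rintro ((hx | ⟨f, hf, rest⟩) | ⟨i, hi, hc, rest⟩)
          · exact Or.inl hx
          · exact Or.inr ⟨a, by simp, ⟨c, hm, hF⟩, ⟨f, hf, rest⟩⟩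
          · exact Or.inr ⟨i, by simp [hi], hc, rest⟩
        · rintro (hx | ⟨i, hi, hc, rest⟩)
          · exact Or.inl (Or.inl hx)
          · rcases List.mem_cons.mp hi with rfl | hi
            · exact Or.inl (Or.inr rest)
            · exact Or.inr ⟨i, hi, hc, rest⟩

theorem sum_ones (l : List Int) (h : ∀ v ∈ l, v = 1) : l.sum = (l.length : Int) := by
  induction l with
  | nil => simp
  | cons a t ih =>
    simp only [List.sum_cons, List.length_cons, h a (by simp)]
    rw [ih (fun v hv => h v (by simp [hv]))]; push_cast; ring

theorem values_sum_eq_card (d : PySem.Dict Int Int) (h : dictP d) :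
    d.values.sum = (d.keys.toFinset.card : Int) := by
  rw [sum_ones d.values h.2, List.toFinset_card_of_nodup h.1]
  simp [PySem.Dict.keys, PySem.Dict.values]

-- ===== B-side machinery =====


def revNat (cs : List Char) (r : Nat) : Nat :=
  cs.foldl (fun r ch => (r <<< 1) ||| (if ch ≠ 'F' then 1 else 0)) r

def fansFold (revN Lnat mask : Nat) (fans : List Int) (a : Nat) : Nat :=
  fans.foldl (fun a (f : Int) =>
    if 0 ≤ f then a ||| (((revN <<< f.toNat) >>> (Lnat - 1)) &&& mask) else a) a

theorem rev_cast (cs : List Char) (r : Nat) :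
    cs.foldl (fun rev ch => PySem.Int.bor (rev <<< (1 : Nat)) (if ch ≠ 'F' then 1 else 0)) (r : Int)
      = ((revNat cs r : Nat) : Int) := by
  induction cs generalizing r with
  | nil => simp [revNat]
  | cons ch t ih =>
    simp only [revNat, List.foldl_cons] at *
    have h1 : PySem.Int.bor ((r : Int) <<< (1 : Nat)) (if ch ≠ 'F' then 1 else 0)
        = (((r <<< 1) ||| (if ch ≠ 'F' then 1 else 0) : Nat) : Int) := by
      split
      · show PySem.Int.bor ((r <<< 1 : Nat) : Int) ((1 : Nat) : Int) = _
        rw [PySem.Int.bor_natCast]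
      · show PySem.Int.bor ((r <<< 1 : Nat) : Int) ((0 : Nat) : Int) = _
        rw [PySem.Int.bor_natCast]
    rw [h1, ih]

theorem fails_cast (revN Lnat mask : Nat) (fans : List Int) (a : Nat) :
    fans.foldl (fun fails (f : Int) =>
        if 0 ≤ f then
          PySem.Int.bor fails (PySem.Int.band (((revN : Int) <<< f.toNat) >>> ((Lnat : Int) - 1).toNat) (mask : Int))
        else fails) (a : Int)
      = ((fansFold revN Lnat mask fans a : Nat) : Int) := by
  induction fans generalizing a with
  | nil => simp [fansFold]
  | cons f t ih =>
    simp only [fansFold, List.foldl_cons] at *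
    by_cases hf : 0 ≤ f
    · simp only [if_pos hf]
      have h1 : PySem.Int.bor (a : Int) (PySem.Int.band (((revN : Int) <<< f.toNat) >>> ((Lnat : Int) - 1).toNat) (mask : Int))
          = ((a ||| (((revN <<< f.toNat) >>> (Lnat - 1)) &&& mask) : Nat) : Int) := by
        have hL : ((Lnat : Int) - 1).toNat = Lnat - 1 := by omega
        rw [hL]
        show PySem.Int.bor ((a : Nat) : Int) (PySem.Int.band (((revN <<< f.toNat) >>> (Lnat - 1) : Nat) : Int) ((mask : Nat) : Int)) = _
        rw [PySem.Int.band_natCast, PySem.Int.bor_natCast]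
      rw [h1, ih]
    · simp only [if_neg hf, ih]

theorem fansFold_testBit (revN Lnat mask : Nat) (fans : List Int) (a c : Nat) :
    (fansFold revN Lnat mask fans a).testBit c
      ↔ a.testBit c ∨ ∃ f ∈ fans, 0 ≤ f ∧ (((revN <<< f.toNat) >>> (Lnat - 1)) &&& mask).testBit c := by
  induction fans generalizing a with
  | nil => simp [fansFold]
  | cons f t ih =>
    simp only [fansFold, List.foldl_cons] at *
    by_cases hf : 0 ≤ f
    · simp only [if_pos hf]
      rw [ih, Nat.testBit_lor]
      constructor
      · rintro (h | h)
        · rcases Bool.or_eq_true_iff.mp h with h | h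
          · exact Or.inl h
          · exact Or.inr ⟨f, by simp, hf, h⟩
        · obtain ⟨g, hg, h0, hb⟩ := h
          exact Or.inr ⟨g, by simp [hg], h0, hb⟩
      · rintro (h | ⟨g, hg, h0, hb⟩)
        · exact Or.inl (by simp [h])
        · rcases List.mem_cons.mp hg with rfl | hg
          · exact Or.inl (by simp [hb])
          · exact Or.inr ⟨g, hg, h0, hb⟩
    · simp only [if_neg hf]
      rw [ih]
      constructor
      · rintro (h | ⟨g, hg, h0, hb⟩)
        · exact Or.inl h
        · exact Or.inr ⟨g, by simp [hg], h0, hb⟩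
      · rintro (h | ⟨g, hg, h0, hb⟩)
        · exact Or.inl h
        · rcases List.mem_cons.mp hg with rfl | hg
          · exact absurd h0 hf
          · exact Or.inr ⟨g, hg, h0, hb⟩

theorem revNat_testBit (cs : List Char) (r j : Nat) :
    (revNat cs r).testBit j
      ↔ (∃ (i : Nat) (h : i < cs.length), i + j + 1 = cs.length ∧ cs[i] ≠ 'F')
        ∨ (cs.length ≤ j ∧ r.testBit (j - cs.length)) := by
  induction cs generalizing r with
  | nil => simp [revNat]
  | cons ch t ih =>
    simp only [revNat, List.foldl_cons] at *
    rw [ih]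
    constructor
    · rintro (⟨i, h, hsum, hF⟩ | ⟨hle, hb⟩)
      · exact Or.inl ⟨i + 1, by simpa using h, by simp; omega, by simpa using hF⟩
      · rw [Nat.testBit_lor, Nat.testBit_shiftLeft] at hb
        rcases Bool.or_eq_true_iff.mp hb with hb | hb
        · have h1 : 1 ≤ j - t.length := by
            rcases Bool.and_eq_true_iff.mp hb with ⟨hd, _⟩
            simpa using of_decide_eq_true hd
          refine Or.inr ⟨by simp; omega, ?_⟩
          rcases Bool.and_eq_true_iff.mp hb with ⟨_, hr⟩
          have : j - (ch :: t).length = j - t.length - 1 := by simp; omega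
          rw [this]; exact hr
        · by_cases hch : ch ≠ 'F'
          · simp only [if_pos hch] at hb
            have hj : j - t.length = 0 := by
              have h10 : (1 : Nat) = 2 ^ 0 := rfl
              rw [h10, Nat.testBit_two_pow] at hb
              exact (of_decide_eq_true hb).symm
            exact Or.inl ⟨0, by simp, by simp; omega, by simpa using hch⟩
          · simp only [if_neg hch] at hb
            simp at hb
    · rintro (⟨i, h, hsum, hF⟩ | ⟨hle, hb⟩)
      · cases i with
        | zero =>
          refine Or.inr ⟨by simp at hsum ⊢; omega, ?_⟩
          rw [Nat.testBit_lor, Nat.testBit_shiftLeft]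
          have hj : j - t.length = 0 := by simp at hsum; omega
          rw [hj]
          have : ch ≠ 'F' := by simpa using hF
          simp [this]
        | succ k =>
          refine Or.inl ⟨k, by simp at h; omega, by simp at hsum ⊢; omega, by simpa using hF⟩
      · refine Or.inr ⟨by simp at hle; omega, ?_⟩
        rw [Nat.testBit_lor, Nat.testBit_shiftLeft]
        have h1 : 1 ≤ j - t.length := by simp at hle; omega
        have h2 : j - t.length - 1 = j - (ch :: t).length := by simp; omega
        simp only [ge_iff_le]
        have : decide (1 ≤ j - t.length) = true := by simpa using h1
        rw [this, h2, hb]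
        simp

theorem land_odd (n : Nat) (hn : n % 2 = 1) : n &&& (n - 1) = n - 1 := by
  apply Nat.eq_of_testBit_eq
  intro i
  rw [Nat.testBit_land]
  cases i with
  | zero =>
    simp only [Nat.testBit_zero]
    have h1 : (n - 1) % 2 = 0 := by omega
    simp [hn, h1]
  | succ k =>
    simp only [Nat.testBit_add_one]
    have : (n - 1) / 2 = n / 2 := by omega
    rw [this, Bool.and_self]

theorem land_even (m : Nat) (hm : 0 < m) : (2 * m) &&& (2 * m - 1) = 2 * (m &&& (m - 1)) := by
  apply Nat.eq_of_testBit_eq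
  intro i
  rw [Nat.testBit_land]
  cases i with
  | zero =>
    have h1 : (2 * m) % 2 = 0 := by omega
    have h2 : (2 * (m &&& (m - 1))) % 2 = 0 := by omega
    simp [Nat.testBit_zero, h1, h2]
  | succ k =>
    simp only [Nat.testBit_add_one]
    have h1 : (2 * m) / 2 = m := by omega
    have h2 : (2 * m - 1) / 2 = m - 1 := by omega
    have h3 : (2 * (m &&& (m - 1))) / 2 = m &&& (m - 1) := by omega
    rw [h1, h2, h3, Nat.testBit_land]


theorem perFan (cs : List Char) (f : Int) (hf : 0 ≤ f) (hL : 1 ≤ cs.length) (tcN c : Nat) :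
    ((((revNat cs 0) <<< f.toNat) >>> (cs.length - 1)) &&& (2 ^ tcN - 1)).testBit c
      ↔ ∃ (i : Nat) (h : i < cs.length), cs[i] ≠ 'F' ∧ (c : Int) = f - (i : Int) ∧ c < tcN := by
  rw [Nat.and_two_pow_sub_one_eq_mod, Nat.testBit_mod_two_pow, Nat.testBit_shiftRight,
    Nat.testBit_shiftLeft]
  constructor
  · intro h
    rcases Bool.and_eq_true_iff.mp h with ⟨hc, h2⟩
    rcases Bool.and_eq_true_iff.mp h2 with ⟨hge, hb⟩
    have hc' : c < tcN := of_decide_eq_true hc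
    have hge' : f.toNat ≤ cs.length - 1 + c := by simpa using of_decide_eq_true hge
    rw [revNat_testBit] at hb
    rcases hb with ⟨i, hi, hsum, hF⟩ | ⟨_, hb0⟩
    · refine ⟨i, hi, hF, ?_, hc'⟩
      omega
    · simp at hb0
  · rintro ⟨i, hi, hF, hci, hc⟩
    have hfi : f.toNat = c + i := by omega
    refine Bool.and_eq_true_iff.mpr ⟨by simpa using hc, Bool.and_eq_true_iff.mpr ⟨?_, ?_⟩⟩
    · simp only [ge_iff_le]; exact decide_eq_true (by omega)
    · rw [revNat_testBit]
      exact Or.inl ⟨i, hi, by omega, hF⟩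

def popc (n : Nat) : Nat :=
  if n = 0 then 0 else n % 2 + popc (n / 2)
decreasing_by exact Nat.div_lt_self (Nat.pos_of_ne_zero (by assumption)) (by omega)

theorem popc_len (n : Nat) : popc n = n.bitIndices.length := by
  induction n using Nat.strong_induction_on with
  | _ n ih =>
    by_cases h0 : n = 0
    · simp [h0, popc]
    · rw [popc, if_neg h0]
      rcases (by omega : n % 2 = 0 ∨ n % 2 = 1) with hm | hm
      · have h2 : n = 2 * (n / 2) := by omega
        rw [hm]
        conv_rhs => rw [h2]
        rw [Nat.bitIndices_two_mul, List.length_map, ← ih (n / 2) (by omega)]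
        omega
      · have h2 : n = 2 * (n / 2) + 1 := by omega
        rw [hm]
        conv_rhs => rw [h2]
        rw [Nat.bitIndices_two_mul_add_one, List.length_cons, List.length_map,
          ← ih (n / 2) (by omega)]
        omega

theorem mem_bitIndices (n : Nat) : ∀ a, a ∈ n.bitIndices ↔ n.testBit a = true := by
  induction n using Nat.strong_induction_on with
  | _ n ih =>
    intro a
    by_cases h0 : n = 0
    · simp [h0]
    rcases (by omega : n % 2 = 0 ∨ n % 2 = 1) with hm | hm
    · have h2 : n = 2 * (n / 2) := by omega
      conv_lhs => rw [h2]
      rw [Nat.bitIndices_two_mul, List.mem_map]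
      cases a with
      | zero =>
        simp only [Nat.testBit_zero]
        constructor
        · rintro ⟨b, _, hb⟩; omega
        · intro h; exfalso; have := of_decide_eq_true h; omega
      | succ k =>
        rw [Nat.testBit_add_one]
        constructor
        · rintro ⟨b, hb, hbe⟩
          have hbk : b = k := by omega
          rw [← hbk]
          exact (ih (n / 2) (by omega) b).mp hb
        · intro h
          exact ⟨k, (ih (n / 2) (by omega) k).mpr h, rfl⟩
    · have h2 : n = 2 * (n / 2) + 1 := by omega
      conv_lhs => rw [h2]
      rw [Nat.bitIndices_two_mul_add_one]
      cases a with
      | zero =>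
        simp only [Nat.testBit_zero, List.mem_cons]
        have : n % 2 = 1 := by omega
        simp [this]
      | succ k =>
        rw [Nat.testBit_add_one, List.mem_cons, List.mem_map]
        constructor
        · rintro (h | ⟨b, hb, hbe⟩)
          · omega
          · have hbk : b = k := by omega
            rw [← hbk]
            exact (ih (n / 2) (by omega) b).mp hb
        · intro h
          exact Or.inr ⟨k, (ih (n / 2) (by omega) k).mpr h, rfl⟩


-- one unfolding step on a Nat cast
theorem kern_step (n : Nat) (hn : 0 < n) (c : Int) :
    kernighan (n : Int) c = kernighan ((n &&& (n - 1) : Nat) : Int) (c + 1) := by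
  rw [kernighan]
  have hpos : 0 < (n : Int) := by omega
  rw [dif_pos hpos]
  congr 1
  rw [PySem.Int.band_of_nonneg (by omega) (by omega)]
  have h1 : (n : Int).toNat = n := by omega
  have h2 : ((n : Int) - 1).toNat = n - 1 := by omega
  rw [h1, h2]

theorem kern_zero (c : Int) : kernighan ((0 : Nat) : Int) c = c := by
  rw [kernighan]; norm_num

theorem kern_double (m : Nat) : ∀ c, kernighan ((2 * m : Nat) : Int) c = kernighan (m : Int) c := by
  induction m using Nat.strong_induction_on with
  | _ m ih =>
    intro c
    by_cases h0 : m = 0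
    · subst h0; norm_num
    · have hm : 0 < m := Nat.pos_of_ne_zero h0
      rw [kern_step (2 * m) (by omega) c, land_even m hm,
        ih (m &&& (m - 1)) (by have := Nat.and_le_right (n := m) (m := m - 1); omega) (c + 1),
        ← kern_step m hm c]

theorem kern_pop (n : Nat) : ∀ c, kernighan (n : Int) c = c + (popc n : Int) := by
  induction n using Nat.strong_induction_on with
  | _ n ih =>
    intro c
    by_cases h0 : n = 0
    · subst h0; rw [kern_zero, popc]; norm_num
    · have hn : 0 < n := Nat.pos_of_ne_zero h0
      rcases (by omega : n % 2 = 0 ∨ n % 2 = 1) with hm | hm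
      · have h2 : n = 2 * (n / 2) := by omega
        conv_lhs => rw [h2]
        have hp : popc n = popc (n / 2) := by
          conv_lhs => rw [popc, if_neg h0]
          omega
        rw [kern_double (n / 2) c, ih (n / 2) (by omega) c, hp]
      · rw [kern_step n hn c, land_odd n hm, ih (n - 1) (by omega) (c + 1)]
        have hp1 : popc n = 1 + popc (n / 2) := by rw [popc, if_neg h0]; omega
        have hp2 : popc (n - 1) = popc (n / 2) := by
          by_cases h1 : n - 1 = 0
          · rw [h1]
            have : n / 2 = 0 := by omega
            rw [this]
          · rw [popc, if_neg h1]
            have ha : (n - 1) % 2 = 0 := by omega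
            have hb : (n - 1) / 2 = n / 2 := by omega
            rw [ha, hb]; omega
        rw [hp1, hp2]
        push_cast
        ring

theorem tcMask_cast (tc : Int) :
    (if 0 < tc then ((1 : Int) <<< tc.toNat) - 1 else 0) = ((2 ^ tc.toNat - 1 : Nat) : Int) := by
  split
  · have h1 : ((1 : Int) <<< tc.toNat) = ((1 <<< tc.toNat : Nat) : Int) := rfl
    rw [h1, Nat.shiftLeft_eq]
    have : (1 : Nat) ≤ 2 ^ tc.toNat := Nat.one_le_two_pow
    push_cast [this]
    ring
  · have : tc.toNat = 0 := by omega
    simp [this]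

-- ===== FINAL ASSEMBLY =====

-- the set of failing shifts, as characterised on A's dict keys by outer_fold_lemma
def ValidA (members : String) (fans : List Int) (tc x : Int) : Prop :=
  ∃ i ∈ PySem.List.pyRange 0 ((members.toList.length : Nat) : Int) 1,
    (∃ c, PySem.Str.pyGet? members i = some c ∧ c ≠ 'F')
      ∧ ∃ f ∈ fans, x = f - i ∧ 0 ≤ x ∧ x < tc

theorem bitChar (m : String) (fans : List Int) (tc : Int) (hL : 1 ≤ m.toList.length) (c : Nat) :
    (fansFold (revNat m.toList 0) m.toList.length (2 ^ tc.toNat - 1) fans 0).testBit c = true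
      ↔ ValidA m fans tc (c : Int) := by
  rw [fansFold_testBit]
  constructor
  · rintro (h0 | ⟨f, hf, h0f, hb⟩)
    · simp at h0
    · rw [perFan m.toList f h0f hL tc.toNat c] at hb
      obtain ⟨iN, hiN, hF, hci, hctc⟩ := hb
      refine ⟨(iN : Int), ?_, ⟨m.toList[iN], ?_, hF⟩, f, hf, hci, by omega, by omega⟩
      · rw [PySem.List.mem_pyRange_one]
        constructor
        · omega
        · exact_mod_cast hiN
      · rw [PySem.Str.pyGet?_eq]
        show PySem.List.pyGet? m.toList (iN : Int) = _
        simp [List.getElem?_eq_getElem hiN]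
  · rintro ⟨i, hi, ⟨ch, hg, hF⟩, f, hf, hx, hx0, hxtc⟩
    rw [PySem.List.mem_pyRange_one] at hi
    have hilt : i.toNat < m.toList.length := by omega
    have hg' : ch = m.toList[i.toNat] := by
      rw [PySem.Str.pyGet?_eq, PySem.Chars.pyGet?] at hg
      have := PySem.List.pyGet?_eq_some_getElem m.toList (i := i) (by omega)
        (by exact_mod_cast hi.2)
      rw [this] at hg
      injection hg with hg
      exact hg.symm
    refine Or.inr ⟨f, hf, by omega, ?_⟩
    rw [perFan m.toList f (by omega) hL tc.toNat c]
    refine ⟨i.toNat, hilt, ?_, by omega, by omega⟩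
    rw [← hg']
    exact hF

-- a male member forces a set bit in the member bitmask
theorem male_bit (cs : List Char) (iN : Nat) (h : iN < cs.length) (hF : cs[iN] ≠ 'F') :
    (revNat cs 0).testBit (cs.length - 1 - iN) = true := by
  rw [revNat_testBit]
  exact Or.inl ⟨iN, h, by omega, hF⟩

theorem kern_zero' : kernighan 0 0 = 0 := by
  rw [kernighan]; norm_num

-- ===== VERDICT =====
theorem solution_spec : Claim_equal_solution := by
  intro m fans tc _
  unfold Spec_solution solution solution_alt
  dsimp only
  have hlen : PySem.Str.len m = ((m.toList.length : Nat) : Int) := by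
    simp [PySem.Str.len_eq]
  rw [hlen]
  have hemp : dictP PySem.Dict.empty := by
    constructor
    · exact PySem.Dict.nodup_keys_empty
    · intro v hv; simp [PySem.Dict.values, PySem.Dict.empty] at hv
  obtain ⟨hP, hK⟩ := outer_fold_lemma m fans tc
    (PySem.List.pyRange 0 ((m.toList.length : Nat) : Int) 1) PySem.Dict.empty hemp
  rw [values_sum_eq_card _ hP]
  have hKv : ∀ x, x ∈ (List.foldl (fun d memberIdx =>
      match PySem.Str.pyGet? m memberIdx with
      | none => d
      | some member =>
        if member = 'F' then d
        else
          List.foldl (fun d maleFanIdx =>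
            let caseIdx := maleFanIdx - memberIdx
            if ¬ (caseIdx < 0 ∨ caseIdx ≥ tc) then d.insert caseIdx 1 else d) d fans)
      (PySem.Dict.empty : PySem.Dict Int Int)
      (PySem.List.pyRange 0 ((m.toList.length : Nat) : Int) 1)).keys
      ↔ ValidA m fans tc x := by
    intro x
    refine Iff.trans (hK x) ?_
    rw [PySem.Dict.keys_empty]
    simp only [List.not_mem_nil, false_or]
    rfl
  have hrevc : (m.toList.foldl
        (fun rev ch => PySem.Int.bor (rev <<< (1 : Nat)) (if ch ≠ 'F' then 1 else 0)) 0)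
      = ((revNat m.toList 0 : Nat) : Int) := by
    have := rev_cast m.toList 0
    simpa using this
  rw [hrevc]
  by_cases hrev : revNat m.toList 0 = 0
  · -- no male member: the dict stays empty and B's fails mask is 0
    rw [hrev]
    simp only [Nat.cast_zero, ne_eq, not_true_eq_false, if_false, kern_zero']
    have hempty : ∀ x, ¬ ValidA m fans tc x := by
      rintro x ⟨i, hi, ⟨ch, hg, hF⟩, -⟩
      rw [PySem.List.mem_pyRange_one] at hi
      have hilt : i.toNat < m.toList.length := by omega
      have hg' : ch = m.toList[i.toNat] := by
        rw [PySem.Str.pyGet?_eq, PySem.Chars.pyGet?] at hg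
        have := PySem.List.pyGet?_eq_some_getElem m.toList (i := i) (by omega)
          (by exact_mod_cast hi.2)
        rw [this] at hg
        injection hg with hg
        exact hg.symm
      have hbit := male_bit m.toList i.toNat hilt (by rw [← hg']; exact hF)
      rw [hrev] at hbit
      simp at hbit
    have hnil : (List.foldl (fun d memberIdx =>
        match PySem.Str.pyGet? m memberIdx with
        | none => d
        | some member =>
          if member = 'F' then d
          else
            List.foldl (fun d maleFanIdx =>
              let caseIdx := maleFanIdx - memberIdx
              if ¬ (caseIdx < 0 ∨ caseIdx ≥ tc) then d.insert caseIdx 1 else d) d fans)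
        (PySem.Dict.empty : PySem.Dict Int Int)
        (PySem.List.pyRange 0 ((m.toList.length : Nat) : Int) 1)).keys.toFinset = ∅ := by
      apply Finset.eq_empty_iff_forall_notMem.mpr
      intro x hx
      exact hempty x ((hKv x).mp (List.mem_toFinset.mp hx))
    rw [hnil]
    simp
  · -- at least one male member
    have hne : ((revNat m.toList 0 : Nat) : Int) ≠ 0 := by
      exact_mod_cast hrev
    rw [if_pos hne]
    have hL : 1 ≤ m.toList.length := by
      by_contra h
      have hnil : m.toList = [] := List.eq_nil_of_length_eq_zero (by omega)
      rw [hnil] at hrev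
      exact hrev rfl
    rw [tcMask_cast tc]
    have hfails := fails_cast (revNat m.toList 0) m.toList.length (2 ^ tc.toNat - 1) fans 0
    simp only [Nat.cast_zero] at hfails
    rw [hfails, kern_pop, popc_len]
    have hcard : (List.foldl (fun d memberIdx =>
        match PySem.Str.pyGet? m memberIdx with
        | none => d
        | some member =>
          if member = 'F' then d
          else
            List.foldl (fun d maleFanIdx =>
              let caseIdx := maleFanIdx - memberIdx
              if ¬ (caseIdx < 0 ∨ caseIdx ≥ tc) then d.insert caseIdx 1 else d) d fans)
        (PySem.Dict.empty : PySem.Dict Int Int)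
        (PySem.List.pyRange 0 ((m.toList.length : Nat) : Int) 1)).keys.toFinset
        = ((fansFold (revNat m.toList 0) m.toList.length (2 ^ tc.toNat - 1) fans 0).bitIndices.toFinset.image
            (fun a : Nat => (a : Int))) := by
      ext x
      rw [List.mem_toFinset, Finset.mem_image, hKv x]
      constructor
      · intro hv
        have hx0 : 0 ≤ x := by
          obtain ⟨-, -, -, f, -, -, hx0, -⟩ := hv
          exact hx0
        refine ⟨x.toNat, ?_, by omega⟩
        rw [List.mem_toFinset, mem_bitIndices, bitChar m fans tc hL x.toNat]
        have : ((x.toNat : Nat) : Int) = x := by omega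
        rw [this]
        exact hv
      · rintro ⟨a, ha, rfl⟩
        rw [List.mem_toFinset, mem_bitIndices, bitChar m fans tc hL a] at ha
        exact ha
    rw [hcard, Finset.card_image_of_injective _ (fun a b h => by omega),
      List.toFinset_card_of_nodup Nat.bitIndices_nodup]
    ring
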